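-- pv_equiv track=rewrite | github.com/legion49f/parasitic_numbers | parasitic_numbers.py | check_parasitic_property
-- ===== SOURCE A (Python) =====
-- def check_parasitic_property(num:str ) -> bool:
--     if num == len(num) * num[0]:
--         return False
--     new_number = int(num[1:] + num[0])
--     num = int(num)
--     for n in [1, 2, 3, 4, 5, 6, 7, 8, 9]:
--         if new_number * n == num:
--             return True
--     return False
-- ===== SOURCE B (Python) =====
-- def check_parasitic_property(num: str) -> bool:
--     if num == len(num) * num[0]:
--         return False
--     new_number = int(num[1:] + num[0])
--     n = int(num)
--     if new_number == 0:
--         return n == 0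
--     q, r = divmod(n, new_number)
--     return r == 0 and 1 <= q <= 9
-- ===== Notes on version B (the rewrite author's own statement) =====
-- stated objective: simpler
-- what changed: B replaces A's search through the nine candidate multipliers by a single divmod: it computes the quotient directly and checks it is an exact divisor between 1 and 9 (with the zero-rotation case checked explicitly).
import Mathlib
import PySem

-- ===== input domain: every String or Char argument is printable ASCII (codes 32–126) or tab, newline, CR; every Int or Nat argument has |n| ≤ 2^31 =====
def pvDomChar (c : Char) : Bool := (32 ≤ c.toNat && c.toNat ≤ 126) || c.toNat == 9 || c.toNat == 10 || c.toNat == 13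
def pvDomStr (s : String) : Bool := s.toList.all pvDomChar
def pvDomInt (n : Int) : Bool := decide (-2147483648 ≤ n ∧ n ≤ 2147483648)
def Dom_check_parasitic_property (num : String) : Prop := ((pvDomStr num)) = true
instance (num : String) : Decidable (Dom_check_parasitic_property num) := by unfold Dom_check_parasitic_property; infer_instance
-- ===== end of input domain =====

-- B replaces A's search through nine candidate multipliers by a single divmod; equivalence proved on Pre_ (inputs where A does not raise).

-- ===== PORT A =====
def check_parasitic_property (num : String) : Bool :=
  let cs := num.toList
  match cs.head? with
  | none => false            -- Python raises IndexError here; outside Pre_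
  | some c =>
    if cs = List.replicate cs.length c then false
    else
      match PySem.Int.ofChars? (cs.tail ++ [c]) with
      | none => false        -- ValueError; outside Pre_
      | some new_number =>
        match PySem.Int.ofChars? cs with
        | none => false      -- ValueError; outside Pre_
        | some n =>
          ([1, 2, 3, 4, 5, 6, 7, 8, 9] : List Int).any (fun k => new_number * k == n)

-- ===== PORT B =====
def check_parasitic_property_alt (num : String) : Bool :=
  let cs := num.toList
  match cs.head? with
  | none => false            -- Python raises IndexError here; outside Pre_
  | some c =>
    if cs = List.replicate cs.length c then false
    else
      match PySem.Int.ofChars? (cs.tail ++ [c]) with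
      | none => false        -- ValueError; outside Pre_
      | some new_number =>
        match PySem.Int.ofChars? cs with
        | none => false      -- ValueError; outside Pre_
        | some n =>
          if new_number = 0 then n == 0
          else
            match PySem.Int.divmod? n new_number with
            | none => false
            | some (q, r) => r == 0 && decide (1 ≤ q) && decide (q ≤ 9)

-- ===== PRECONDITION & SPEC =====
-- Pre_ excludes exactly the inputs where Python A raises: the empty string (IndexError) and
-- strings that are not all one repeated character but whose rotation or whose own text is not
-- a valid int() literal (ValueError).
def Pre_check_parasitic_property (num : String) : Prop :=
  num.toList ≠ [] ∧
  (num.toList = List.replicate num.toList.length (num.toList.headD ' ') ∨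
    ((PySem.Int.ofChars? (num.toList.tail ++ num.toList.take 1)).isSome = true ∧
     (PySem.Int.ofChars? num.toList).isSome = true))
instance (num : String) : Decidable (Pre_check_parasitic_property num) := by
  unfold Pre_check_parasitic_property; infer_instance

def pvWitness_check_parasitic_property : String := " 7 "

def Spec_check_parasitic_property (num : String) (out : Bool) : Prop := out = check_parasitic_property_alt num
instance (num : String) (out : Bool) : Decidable (Spec_check_parasitic_property num out) := by unfold Spec_check_parasitic_property; infer_instance

-- ===== CLAIM (what is proved, stated in full; the proofs are below) =====
def Claim_equal_check_parasitic_property : Prop := ∀ (num : String), Dom_check_parasitic_property num → Pre_check_parasitic_property num → Spec_check_parasitic_property num (check_parasitic_property num)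

-- ===== LEMMAS AND PROOFS =====

-- Core arithmetic fact: searching k ∈ 1..9 with M*k = N is the same as one floor-divmod check.
theorem pv_key (M N : Int) :
    (([1, 2, 3, 4, 5, 6, 7, 8, 9] : List Int).any (fun k => M * k == N)) =
      (if M = 0 then (N == 0)
       else
         match PySem.Int.divmod? N M with
         | none => false
         | some (q, r) => r == 0 && decide (1 ≤ q) && decide (q ≤ 9)) := by
  by_cases hM : M = 0
  · subst hM; simp [eq_comm]
  · have hdm : PySem.Int.divmod? N M = some (PySem.Int.floordiv N M, PySem.Int.mod N M) := by
      simp only [PySem.Int.divmod?, if_neg hM, PySem.Int.floordiv, PySem.Int.mod]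
    rw [if_neg hM, hdm]
    have hmul : PySem.Int.floordiv N M * M + PySem.Int.mod N M = N :=
      PySem.Int.floordiv_mul_add_mod N M
    set q := PySem.Int.floordiv N M
    set r := PySem.Int.mod N M
    rw [Bool.eq_iff_iff]
    simp only [List.any_eq_true, List.mem_cons, List.not_mem_nil, or_false,
      Bool.and_eq_true, beq_iff_eq, decide_eq_true_eq]
    constructor
    · rintro ⟨k, hkmem, hk⟩
      have hr0 : r = 0 := (PySem.Int.mod_eq_zero_iff_dvd N M).mpr ⟨k, hk.symm⟩
      have h1 : q * M = N := by omega
      have hqk : q = k := mul_right_cancel₀ hM ((h1.trans hk.symm).trans (mul_comm M k))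
      refine ⟨⟨hr0, ?_⟩, ?_⟩ <;> (rcases hkmem with h|h|h|h|h|h|h|h|h <;> omega)
    · rintro ⟨⟨hr0, h1⟩, h9⟩
      refine ⟨q, by omega, ?_⟩
      have hqN : q * M = N := by omega
      rw [mul_comm]; exact hqN

theorem check_parasitic_property_eq (num : String)
    (hpre : Pre_check_parasitic_property num) :
    check_parasitic_property num = check_parasitic_property_alt num := by
  obtain ⟨hne, hcase⟩ := hpre
  unfold check_parasitic_property check_parasitic_property_alt
  cases hcs : num.toList with
  | nil => exact absurd hcs hne
  | cons c rest =>
    simp only [hcs] at hcase ⊢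
    simp only [List.head?_cons]
    by_cases hrep : c :: rest = List.replicate (c :: rest).length ((c :: rest).headD ' ')
    · simp only [List.headD_cons] at hrep
      rw [if_pos hrep, if_pos hrep]
    · simp only [List.headD_cons] at hrep
      rw [if_neg hrep, if_neg hrep]
      rcases hcase with h | ⟨h1, h2⟩
      · exact absurd (by simpa using h) hrep
      · simp only [List.tail_cons, List.take_succ_cons, List.take_zero] at h1 h2
        obtain ⟨m, hm⟩ := Option.isSome_iff_exists.mp h1
        obtain ⟨n, hn⟩ := Option.isSome_iff_exists.mp h2
        simp only [List.tail_cons]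
        rw [hm, hn]
        exact pv_key m n

-- ===== VERDICT (by name: the statement is the Claim_ definition above) =====
theorem check_parasitic_property_spec : Claim_equal_check_parasitic_property := by
  intro num _ hpre
  exact check_parasitic_property_eq num hpre
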